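-- pv_equiv track=rewrite | github.com/bendikjohansen/projecteuler | 49.py | check
-- ===== SOURCE A (Python) =====
-- def check(primes, i, expected_diff):
--   if i >= len(primes):
--     return 0
--   for j in range(i + 1, len(primes)):
--     actual_diff = primes[j] - primes[i]
--     if actual_diff == expected_diff:
--       return check(primes, j, expected_diff) + 1
--
--   return 0
-- ===== SOURCE B (Python) =====
-- def check(primes, i, expected_diff):
--     n = len(primes)
--     if not (0 <= i < n):
--         return 0
--     first_at = {}
--     chain = [0] * n
--     for idx in range(n - 1, -1, -1):
--         j = first_at.get(primes[idx] + expected_diff)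
--         chain[idx] = 0 if j is None else chain[j] + 1
--         first_at[primes[idx]] = idx
--     return chain[i]
-- ===== Notes on version B (the rewrite author's own statement) =====
-- stated objective: alternative
-- what changed: Replaces the recursive first-match rescan (a fresh linear scan per chain link) by one backward pass building a value-to-next-index dict plus a DP table of chain lengths, answered by a single lookup; it trades a per-link rescan for a one-pass precomputation.
-- intended difference: For negative in-range i (Python index wraparound) whose forward scan range(i+1,len) contains a position holding primes[i]+expected_diff, A follows a chain through aliased negative indices and returns a positive count, while B treats a negative chain-start index as out of range and returns 0, the intended behavior for an index parameter. — e.g. on check([2, 3], -2, 1): A returns 1, B returns 0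
import Mathlib
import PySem

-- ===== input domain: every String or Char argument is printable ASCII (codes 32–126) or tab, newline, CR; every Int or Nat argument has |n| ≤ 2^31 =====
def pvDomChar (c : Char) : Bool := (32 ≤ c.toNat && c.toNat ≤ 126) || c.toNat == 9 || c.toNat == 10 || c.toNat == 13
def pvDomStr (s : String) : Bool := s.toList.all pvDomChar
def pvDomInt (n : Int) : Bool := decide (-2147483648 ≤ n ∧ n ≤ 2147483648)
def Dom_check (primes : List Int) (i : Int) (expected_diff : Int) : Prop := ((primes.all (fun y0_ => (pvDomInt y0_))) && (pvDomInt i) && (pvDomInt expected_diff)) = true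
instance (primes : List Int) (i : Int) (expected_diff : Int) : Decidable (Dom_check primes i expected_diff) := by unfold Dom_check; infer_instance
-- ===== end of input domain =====

-- B replaces A's recursive first-match rescans by one backward pass (value→next-index dict + DP chain lengths); B treats a negative start index as out of range (see D_check).

-- ===== PORT A =====
def check (primes : List Int) (i : Int) (expected_diff : Int) : Int :=
  if i ≥ (primes.length : Int) then 0
  else
    match hf : (PySem.List.pyRange (i + 1) (primes.length : Int) 1).find? (fun j =>
        match PySem.List.pyGet? primes j, PySem.List.pyGet? primes i with
        | some a, some b => a - b == expected_diff
        | _, _ => false) with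
    | some j => check primes j expected_diff + 1
    | none => 0
termination_by ((primes.length : Int) - i).toNat
decreasing_by
  have hj := List.mem_of_find?_eq_some hf
  rw [PySem.List.mem_pyRange_one] at hj
  omega

-- ===== PORT B =====
-- the loop body of Source B (named so the proofs can speak about one iteration)
def altStep (primes : List Int) (expected_diff : Int)
    (st : PySem.Dict Int Int × List Int) (idx : Int) : PySem.Dict Int Int × List Int :=
  let v : Int :=
    match st.1.get? (PySem.List.pyGetD primes idx 0 + expected_diff) with
    | none => 0
    | some j => PySem.List.pyGetD st.2 j 0 + 1
  (st.1.insert (PySem.List.pyGetD primes idx 0) idx, st.2.set idx.toNat v)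

def check_alt (primes : List Int) (i : Int) (expected_diff : Int) : Int :=
  if 0 ≤ i ∧ i < (primes.length : Int) then
    let final :=
      (PySem.List.pyRange ((primes.length : Int) - 1) (-1) (-1)).foldl
        (altStep primes expected_diff)
        (PySem.Dict.empty, List.replicate primes.length 0)
    PySem.List.pyGetD final.2 i 0
  else 0

-- ===== PRECONDITION & SPEC =====
-- Pre_ excludes exactly the inputs where A raises IndexError (an index below -len reached by the scan).
def Pre_check (primes : List Int) (i : Int) (expected_diff : Int) : Prop :=
  ¬ (i < -(primes.length : Int) ∧ i + 1 < (primes.length : Int))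
instance (primes : List Int) (i : Int) (expected_diff : Int) : Decidable (Pre_check primes i expected_diff) := by unfold Pre_check; infer_instance
def pvWitness_check : List Int × Int × Int := ([3, 5, 7, 9], 0, 2)

-- For negative in-range i (Python index wraparound) whose forward scan contains a position holding
-- primes[i]+expected_diff, A follows a chain through aliased negative indices and returns a positive
-- count, while B treats a negative chain-start index as out of range and returns 0, the intended
-- behavior for an index parameter.
def D_check (primes : List Int) (i : Int) (expected_diff : Int) : Prop :=
  -(primes.length : Int) ≤ i ∧ i < 0 ∧
  ∃ j ∈ PySem.List.pyRange (i + 1) (primes.length : Int) 1,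
    PySem.List.pyGet? primes j = (PySem.List.pyGet? primes i).map (· + expected_diff)
instance (primes : List Int) (i : Int) (expected_diff : Int) : Decidable (D_check primes i expected_diff) := by unfold D_check; infer_instance

def Spec_check (primes : List Int) (i : Int) (expected_diff : Int) (out : Int) : Prop :=
  ¬ D_check primes i expected_diff → out = check_alt primes i expected_diff
instance (primes : List Int) (i : Int) (expected_diff : Int) (out : Int) : Decidable (Spec_check primes i expected_diff out) := by unfold Spec_check; infer_instance

def pvDiffWitness_check : List Int × Int × Int := ([2, 3], -2, 1)
def pvDiffWitnessOut_check : Int × Int := (1, 0)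

-- ===== CLAIM (what is proved, stated in full; the proofs are below) =====
def Claim_unchanged_check : Prop := ∀ (primes : List Int) (i : Int) (expected_diff : Int), Dom_check primes i expected_diff → Pre_check primes i expected_diff → Spec_check primes i expected_diff (check primes i expected_diff)
def Claim_changed_check : Prop := Dom_check (pvDiffWitness_check.1) (pvDiffWitness_check.2.1) (pvDiffWitness_check.2.2) ∧ Pre_check (pvDiffWitness_check.1) (pvDiffWitness_check.2.1) (pvDiffWitness_check.2.2) ∧ D_check (pvDiffWitness_check.1) (pvDiffWitness_check.2.1) (pvDiffWitness_check.2.2) ∧ check (pvDiffWitness_check.1) (pvDiffWitness_check.2.1) (pvDiffWitness_check.2.2) = pvDiffWitnessOut_check.1 ∧ check_alt (pvDiffWitness_check.1) (pvDiffWitness_check.2.1) (pvDiffWitness_check.2.2) = pvDiffWitnessOut_check.2 ∧ pvDiffWitnessOut_check.1 ≠ pvDiffWitnessOut_check.2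
def Claim_exact_check : Prop := ∀ (primes : List Int) (i : Int) (expected_diff : Int), Dom_check primes i expected_diff → Pre_check primes i expected_diff → D_check primes i expected_diff → check primes i expected_diff ≠ check_alt primes i expected_diff

-- ===== LEMMAS AND PROOFS =====

-- first index ≥ lo holding value v (ground truth both ports are related to)
def firstHit (primes : List Int) (v : Int) (lo : Nat) : Option Nat :=
  if h : lo < primes.length then
    if primes[lo] = v then some lo else firstHit primes v (lo + 1)
  else none
termination_by primes.length - lo

theorem firstHit_bounds {primes : List Int} {v : Int} {lo j : Nat}
    (h : firstHit primes v lo = some j) :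
    lo ≤ j ∧ ∃ hj : j < primes.length, primes[j] = v := by
  fun_induction firstHit generalizing j with
  | case1 lo h1 h2 =>
      obtain rfl : lo = j := by simp_all
      exact ⟨le_refl _, h1, h2⟩
  | case2 lo h1 h2 ih =>
      have := ih h
      exact ⟨by omega, this.2⟩
  | case3 lo h1 => simp_all

-- chain length starting at index k (the value both ports compute)
def chainLen (primes : List Int) (expected_diff : Int) (k : Nat) : Int :=
  if h : k < primes.length then
    match hm : firstHit primes (primes[k] + expected_diff) (k + 1) with
    | some j => chainLen primes expected_diff j + 1
    | none => 0
  else 0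
termination_by primes.length - k
decreasing_by
  have := firstHit_bounds hm
  omega

theorem firstHit_pos {primes : List Int} (v : Int) {lo : Nat} (h : lo < primes.length) :
    firstHit primes v lo = if primes[lo] = v then some lo else firstHit primes v (lo + 1) := by
  rw [firstHit, dif_pos h]

theorem firstHit_neg {primes : List Int} (v : Int) {lo : Nat} (h : ¬ lo < primes.length) :
    firstHit primes v lo = none := by
  rw [firstHit, dif_neg h]

theorem chainLen_none {primes : List Int} {expected_diff : Int} {k : Nat}
    (hk : k < primes.length)
    (hm : firstHit primes (primes[k] + expected_diff) (k + 1) = none) :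
    chainLen primes expected_diff k = 0 := by
  rw [chainLen, dif_pos hk]
  split
  · rename_i j heq
    rw [hm] at heq
    exact absurd heq (by simp)
  · rfl

theorem chainLen_some {primes : List Int} {expected_diff : Int} {k j : Nat}
    (hk : k < primes.length)
    (hm : firstHit primes (primes[k] + expected_diff) (k + 1) = some j) :
    chainLen primes expected_diff k = chainLen primes expected_diff j + 1 := by
  rw [chainLen, dif_pos hk]
  split
  · rename_i j' heq
    rw [hm] at heq
    cases heq
    rfl
  · rename_i heq
    rw [hm] at heq
    exact absurd heq (by simp)

theorem findA (primes : List Int) (expected_diff : Int) (k : Nat) (hk : k < primes.length) :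
    ∀ lo : Nat,
      (PySem.List.pyRange (lo : Int) (primes.length : Int) 1).find? (fun j =>
          match PySem.List.pyGet? primes j, PySem.List.pyGet? primes (k : Int) with
          | some a, some b => a - b == expected_diff
          | _, _ => false)
        = (firstHit primes (primes[k] + expected_diff) lo).map (fun j => (j : Int)) := by
  have hgetk : PySem.List.pyGet? primes (k : Int) = some primes[k] :=
    PySem.List.pyGet?_ofNat primes k hk
  have main : ∀ (fuel lo : Nat), primes.length ≤ lo + fuel →
      (PySem.List.pyRange (lo : Int) (primes.length : Int) 1).find? (fun j =>
          match PySem.List.pyGet? primes j, PySem.List.pyGet? primes (k : Int) with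
          | some a, some b => a - b == expected_diff
          | _, _ => false)
        = (firstHit primes (primes[k] + expected_diff) lo).map (fun j => (j : Int)) := by
    intro fuel
    induction fuel with
    | zero =>
        intro lo hlo
        rw [PySem.List.pyRange_one_eq_nil (by exact_mod_cast (by omega : primes.length ≤ lo))]
        rw [firstHit, dif_neg (by omega)]
        rfl
    | succ m ih =>
        intro lo hlo
        by_cases hlt : lo < primes.length
        · have hgetlo : PySem.List.pyGet? primes (lo : Int) = some primes[lo] :=
            PySem.List.pyGet?_ofNat primes lo hlt
          rw [PySem.List.pyRange_one_cons (by exact_mod_cast hlt)]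
          rw [firstHit, dif_pos hlt]
          have hcast : ((lo : Int) + 1) = ((lo + 1 : Nat) : Int) := by push_cast; ring
          have hpred : ((fun j => match PySem.List.pyGet? primes j, PySem.List.pyGet? primes (k : Int) with
              | some a, some b => a - b == expected_diff
              | _, _ => false) ((lo : Int))) = (primes[lo] - primes[k] == expected_diff) := by
            simp only [hgetlo, hgetk]
          by_cases he : primes[lo] = primes[k] + expected_diff
          · rw [List.find?_cons_of_pos (by simp only [hpred, beq_iff_eq]; omega), if_pos he]
            rfl
          · rw [List.find?_cons_of_neg (by simp only [hpred, beq_iff_eq]; omega), if_neg he,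
              hcast, ih (lo + 1) (by omega)]
        · rw [PySem.List.pyRange_one_eq_nil (by exact_mod_cast (by omega : primes.length ≤ lo))]
          rw [firstHit, dif_neg (by omega)]
          rfl
  intro lo
  exact main primes.length lo (by omega)

theorem A_eq_chainLen (primes : List Int) (expected_diff : Int) :
    ∀ k : Nat, check primes (k : Int) expected_diff = chainLen primes expected_diff k := by
  have main : ∀ (fuel k : Nat), primes.length ≤ k + fuel →
      check primes (k : Int) expected_diff = chainLen primes expected_diff k := by
    intro fuel
    induction fuel with
    | zero =>
        intro k hk
        rw [check, if_pos (by exact_mod_cast (by omega : primes.length ≤ k))]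
        rw [chainLen, dif_neg (by omega)]
    | succ m ih =>
        intro k hk
        by_cases hlt : k < primes.length
        · rw [check, if_neg (by exact_mod_cast (by omega : ¬ primes.length ≤ k))]
          have hcast : ((k : Int) + 1) = ((k + 1 : Nat) : Int) := by push_cast; ring
          split
          · rename_i j heq
            rw [hcast, findA primes expected_diff k hlt (k + 1)] at heq
            cases hm : firstHit primes (primes[k] + expected_diff) (k + 1) with
            | none => rw [hm] at heq; exact absurd heq (by simp [Option.map_none])
            | some j' =>
                rw [hm] at heq
                have heq' : j = (j' : Int) := by
                  simpa using heq.symm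
                subst heq'
                obtain ⟨hj1, hjlt, _⟩ := firstHit_bounds hm
                rw [ih j' (by omega), chainLen_some hlt hm]
          · rename_i heq
            rw [hcast, findA primes expected_diff k hlt (k + 1)] at heq
            cases hm : firstHit primes (primes[k] + expected_diff) (k + 1) with
            | some j' => rw [hm] at heq; exact absurd heq (by simp)
            | none => rw [chainLen_none hlt hm]
        · rw [check, if_pos (by exact_mod_cast (by omega : primes.length ≤ k))]
          rw [chainLen, dif_neg (by omega)]
  intro k
  exact main primes.length k (by omega)

-- invariant of Source B's backward pass after all indices ≥ t have been processed
def AltInv (primes : List Int) (expected_diff : Int) (t : Nat)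
    (st : PySem.Dict Int Int × List Int) : Prop :=
  (∀ v : Int, st.1.get? v = (firstHit primes v t).map Int.ofNat) ∧
  st.2.length = primes.length ∧
  ∀ k : Nat, k < primes.length →
    st.2[k]? = some (if t ≤ k then chainLen primes expected_diff k else 0)

theorem step_inv {primes : List Int} {expected_diff : Int} {t : Nat}
    {st : PySem.Dict Int Int × List Int} (ht : t < primes.length)
    (h : AltInv primes expected_diff (t + 1) st) :
    AltInv primes expected_diff t (altStep primes expected_diff st (t : Int)) := by
  obtain ⟨h1, h2, h3⟩ := h
  have hget : PySem.List.pyGetD primes (t : Int) 0 = primes[t] := by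
    rw [PySem.List.pyGetD_natCast]
    exact List.getD_eq_getElem primes 0 ht
  have hv : (match st.1.get? (primes[t] + expected_diff) with
      | none => (0 : Int)
      | some j => PySem.List.pyGetD st.2 j 0 + 1) = chainLen primes expected_diff t := by
    rw [h1]
    cases hm : firstHit primes (primes[t] + expected_diff) (t + 1) with
    | none => simpa using (chainLen_none ht hm).symm
    | some j =>
        obtain ⟨hj1, hjlt, _⟩ := firstHit_bounds hm
        have hch : PySem.List.pyGetD st.2 (j : Int) 0 = chainLen primes expected_diff j := by
          rw [PySem.List.pyGetD_natCast]
          have h3j := h3 j hjlt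
          rw [if_pos (by omega)] at h3j
          rw [List.getD_eq_getElem?_getD, h3j]
          rfl
        show PySem.List.pyGetD st.2 ((j : Nat) : Int) 0 + 1 = chainLen primes expected_diff t
        rw [hch, chainLen_some ht hm]
  have haltstep : altStep primes expected_diff st (t : Int)
      = (st.1.insert primes[t] (t : Int), st.2.set t (chainLen primes expected_diff t)) := by
    simp only [altStep, hget, hv, Int.toNat_natCast]
  rw [haltstep]
  refine ⟨?_, ?_, ?_⟩
  · intro v
    rw [PySem.Dict.get?_insert, firstHit_pos v ht, h1]
    by_cases hv' : v = primes[t]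
    · rw [if_pos hv', if_pos hv'.symm]
      rfl
    · rw [if_neg hv', if_neg (fun hh => hv' hh.symm)]
  · simpa [List.length_set] using h2
  · intro k hk
    rw [List.getElem?_set]
    by_cases hkt : t = k
    · subst hkt
      rw [if_pos rfl, if_pos (by omega), if_pos (le_refl t)]
    · rw [if_neg hkt, h3 k hk]
      by_cases hle : t ≤ k
      · rw [if_pos hle, if_pos (by omega)]
      · rw [if_neg hle, if_neg (by omega)]

theorem fold_inv (primes : List Int) (expected_diff : Int) :
    ∀ (t : Nat), t ≤ primes.length →
      ∀ st : PySem.Dict Int Int × List Int, AltInv primes expected_diff t st →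
      AltInv primes expected_diff 0
        ((PySem.List.pyRange ((t : Int) - 1) (-1) (-1)).foldl (altStep primes expected_diff) st) := by
  intro t
  induction t with
  | zero =>
      intro _ st h
      rw [show ((0 : Nat) : Int) - 1 = (-1 : Int) by norm_num]
      rw [PySem.List.pyRange_neg_one_eq_nil (le_refl _)]
      simpa using h
  | succ m ih =>
      intro hle st h
      rw [show ((m + 1 : Nat) : Int) - 1 = ((m : Nat) : Int) by push_cast; ring]
      rw [PySem.List.pyRange_neg_one_cons (by omega : (-1 : Int) < (m : Nat))]
      rw [List.foldl_cons]
      exact ih (by omega) _ (step_inv (by omega) h)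

theorem B_eq_chainLen {primes : List Int} {i expected_diff : Int}
    (h0 : 0 ≤ i) (h1 : i < (primes.length : Int)) :
    check_alt primes i expected_diff = chainLen primes expected_diff i.toNat := by
  have hinit : AltInv primes expected_diff primes.length
      (PySem.Dict.empty, List.replicate primes.length 0) := by
    refine ⟨?_, by simp, ?_⟩
    · intro v
      rw [PySem.Dict.get?_empty, firstHit_neg v (by omega)]
      rfl
    · intro k hk
      rw [List.getElem?_replicate, if_pos hk, if_neg (by omega)]
  have hinv := fold_inv primes expected_diff primes.length (le_refl _) _ hinit
  obtain ⟨_, hlen, hch⟩ := hinv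
  have hk : i.toNat < primes.length := by omega
  have h3i := hch i.toNat hk
  rw [if_pos (Nat.zero_le _)] at h3i
  rw [check_alt, if_pos ⟨h0, h1⟩]
  have hi : ((i.toNat : Nat) : Int) = i := Int.toNat_of_nonneg h0
  rw [← hi, PySem.List.pyGetD_natCast, List.getD_eq_getElem?_getD, h3i]
  rfl

theorem check_nonneg (primes : List Int) (i expected_diff : Int) :
    0 ≤ check primes i expected_diff := by
  fun_induction check with
  | case1 => simp
  | case2 => omega
  | case3 => simp

-- ===== VERDICT (by name: the statement is the Claim_ definition above) =====
-- pyGet? is some on in-range indices (used for negative i in the D_/Pre_ case analysis)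
theorem pyGet?_isSome_of_inrange {primes : List Int} {x : Int}
    (h1 : -(primes.length : Int) ≤ x) (h2 : x < (primes.length : Int)) :
    ∃ b, PySem.List.pyGet? primes x = some b := by
  apply Option.ne_none_iff_exists'.mp
  rw [Ne, PySem.List.pyGet?_eq_none_iff]
  intro hc
  apply hc
  unfold PySem.Raise.InRange
  omega

theorem check_spec : Claim_unchanged_check := by
  intro primes i expected_diff hdom hpre hD
  by_cases hge : (primes.length : Int) ≤ i
  · rw [check, if_pos hge, check_alt, if_neg (by omega)]
  · by_cases h0 : 0 ≤ i
    · have hA := A_eq_chainLen primes expected_diff i.toNat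
      rw [Int.toNat_of_nonneg h0] at hA
      rw [hA, B_eq_chainLen h0 (by omega)]
    · -- i < 0 : both sides are 0
      rw [check_alt, if_neg (by omega), check, if_neg (by omega)]
      split
      · rename_i j heq
        exfalso
        have hjmem := List.mem_of_find?_eq_some heq
        have hjpred := List.find?_some heq
        rw [PySem.List.mem_pyRange_one] at hjmem
        by_cases hlow : i < -(primes.length : Int)
        · unfold Pre_check at hpre
          omega
        · obtain ⟨b, hb⟩ := pyGet?_isSome_of_inrange (by omega) (by omega : i < (primes.length : Int))
          obtain ⟨a, ha⟩ := pyGet?_isSome_of_inrange (primes := primes) (x := j) (by omega) (by omega)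
          simp only [ha, hb, beq_iff_eq] at hjpred
          apply hD
          refine ⟨by omega, by omega, j, ?_, ?_⟩
          · rw [PySem.List.mem_pyRange_one]
            omega
          · rw [ha, hb]
            simp only [Option.map_some, Option.some.injEq]
            omega
      · rfl

-- one unfolding step of A's port (used to evaluate the witness)
theorem check_step {primes : List Int} {i expected_diff : Int}
    (hi : ¬ i ≥ (primes.length : Int)) :
    check primes i expected_diff =
      (match (PySem.List.pyRange (i + 1) (primes.length : Int) 1).find? (fun j =>
          match PySem.List.pyGet? primes j, PySem.List.pyGet? primes i with
          | some a, some b => a - b == expected_diff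
          | _, _ => false) with
       | some j => check primes j expected_diff + 1
       | none => 0) := by
  rw [check, if_neg hi]
  split
  · rename_i j heq
    rw [heq]
  · rename_i heq
    rw [heq]

theorem check_changed : Claim_changed_check := by
  unfold Claim_changed_check
  refine ⟨by decide, by decide, by decide, ?_, by decide, by decide⟩
  show check [2, 3] (-2) 1 = 1
  have hf1 : (PySem.List.pyRange ((-2 : Int) + 1) ((([2, 3] : List Int).length : Nat) : Int) 1).find?
      (fun j => match PySem.List.pyGet? ([2, 3] : List Int) j,
                      PySem.List.pyGet? ([2, 3] : List Int) (-2 : Int) with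
        | some a, some b => a - b == (1 : Int)
        | _, _ => false) = some (-1) := by decide
  have hf2 : (PySem.List.pyRange ((-1 : Int) + 1) ((([2, 3] : List Int).length : Nat) : Int) 1).find?
      (fun j => match PySem.List.pyGet? ([2, 3] : List Int) j,
                      PySem.List.pyGet? ([2, 3] : List Int) (-1 : Int) with
        | some a, some b => a - b == (1 : Int)
        | _, _ => false) = none := by decide
  rw [check_step (by decide), hf1]
  show check [2, 3] (-1) 1 + 1 = 1
  rw [check_step (by decide), hf2]
  rfl

theorem check_tight : Claim_exact_check := by
  intro primes i expected_diff hdom hpre hD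
  obtain ⟨hD1, hD2, j, hjmem, hjeq⟩ := hD
  have hmem := hjmem
  rw [PySem.List.mem_pyRange_one] at hmem
  have hlen : 0 < (primes.length : Int) := by omega
  have halt : check_alt primes i expected_diff = 0 := by
    rw [check_alt, if_neg (by omega)]
  have hA : 0 < check primes i expected_diff := by
    rw [check, if_neg (by omega)]
    split
    · rename_i j' heq
      have := check_nonneg primes j' expected_diff
      omega
    · rename_i heq
      exfalso
      obtain ⟨b, hb⟩ := pyGet?_isSome_of_inrange (x := i) (by omega) (by omega)
      have := List.find?_eq_none.mp heq j hjmem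
      apply this
      rw [hb] at hjeq
      simp only [hjeq, hb, Option.map_some, beq_iff_eq]
      omega
  rw [halt]
  omega
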